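-- pv_equiv track=rewrite | github.com/kolyapisarenko/chess-project | src/logic/move_gen.py | mask_bishop_occupancy
-- ===== SOURCE A (Python) =====
-- def mask_bishop_occupancy(square):
--     bishop_mask = 0
--     r = square // 8
--     f = square % 8
--     tr, tf = r + 1, f + 1
--     while tr < 7 and tf < 7:
--         bishop_mask |= (1 << (tr * 8 + tf))
--         tr += 1
--         tf += 1
--     tr, tf = r + 1, f - 1
--     while tr < 7 and tf > 0:
--         bishop_mask |= (1 << (tr * 8 + tf))
--         tr += 1
--         tf -= 1
--     tr, tf = r - 1, f + 1
--     while tr > 0 and tf < 7: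
--         bishop_mask |= (1 << (tr * 8 + tf))
--         tr -= 1
--         tf += 1
--     tr, tf = r - 1, f - 1
--     while tr > 0 and tf > 0:
--         bishop_mask |= (1 << (tr * 8 + tf))
--         tr -= 1
--         tf -= 1
--     return bishop_mask & 0xFFFFFFFFFFFFFFFF
-- ===== SOURCE B (Python) =====
-- # B: closed-form ray construction — each diagonal ray is emitted as one geometric-series
-- # bit block instead of walking it square by square (objective: alternative/simpler structure).
-- def _ray(n, step, low):
--     # bits at low, low+step, ..., low+step*(n-1), as one closed-form number
--     if n <= 0:
--         return 0
--     return (((1 << (step * n)) - 1) // ((1 << step) - 1)) << low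
--
--
-- def mask_bishop_occupancy(square):
--     r, f = divmod(square, 8)
--     n1 = min(6 - r, 6 - f)
--     n2 = min(6 - r, f - 1)
--     n3 = min(r - 1, 6 - f)
--     n4 = min(r - 1, f - 1)
--     m = _ray(n1, 9, (r + 1) * 8 + f + 1)
--     m |= _ray(n2, 7, (r + 1) * 8 + f - 1)
--     m |= _ray(n3, 7, (r - 1) * 8 + f + 1 - 7 * (n3 - 1))
--     m |= _ray(n4, 9, (r - 1) * 8 + f - 1 - 9 * (n4 - 1))
--     return m & 0xFFFFFFFFFFFFFFFF
-- ===== Notes on version B (the rewrite author's own statement) =====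
-- stated objective: alternative
-- what changed: B replaces A's four square-by-square diagonal while-loop walks by computing each ray's length in closed form and emitting the whole ray as a single geometric-series bit block ((1<<(step*n))-1)//((1<<step)-1) << low, so no per-square iteration remains.
-- outside the precondition, e.g. on mask_bishop_occupancy(-9): A raises ValueError, B raises ValueError
import Mathlib
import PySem

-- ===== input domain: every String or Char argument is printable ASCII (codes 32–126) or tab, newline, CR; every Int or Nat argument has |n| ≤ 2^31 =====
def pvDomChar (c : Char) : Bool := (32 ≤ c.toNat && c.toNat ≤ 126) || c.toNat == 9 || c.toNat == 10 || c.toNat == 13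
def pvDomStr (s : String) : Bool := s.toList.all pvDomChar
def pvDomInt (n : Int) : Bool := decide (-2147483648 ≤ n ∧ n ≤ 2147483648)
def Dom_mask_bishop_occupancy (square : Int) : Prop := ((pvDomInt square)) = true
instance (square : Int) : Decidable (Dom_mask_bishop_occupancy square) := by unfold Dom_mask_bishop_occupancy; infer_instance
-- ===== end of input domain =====

-- B replaces A's four square-by-square diagonal walks by emitting each ray as one
-- closed-form geometric-series bit block (objective: alternative structure, same cost).

-- ===== PORT A =====
-- the four while-loops of A; acc ||= 1 << (tr*8+tf).  Inside Pre_ every shift amount is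
-- ≥ 0, so `.toNat` is exact there (Python raises ValueError on a negative shift; Pre_
-- excludes exactly those inputs).
def pvLoop1 (tr tf : Int) (acc : Nat) : Nat :=
  if tr < 7 ∧ tf < 7 then pvLoop1 (tr + 1) (tf + 1) (acc ||| (1 <<< (tr * 8 + tf).toNat)) else acc
termination_by (7 - tr).toNat
decreasing_by omega

def pvLoop2 (tr tf : Int) (acc : Nat) : Nat :=
  if tr < 7 ∧ 0 < tf then pvLoop2 (tr + 1) (tf - 1) (acc ||| (1 <<< (tr * 8 + tf).toNat)) else acc
termination_by (7 - tr).toNat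
decreasing_by omega

def pvLoop3 (tr tf : Int) (acc : Nat) : Nat :=
  if 0 < tr ∧ tf < 7 then pvLoop3 (tr - 1) (tf + 1) (acc ||| (1 <<< (tr * 8 + tf).toNat)) else acc
termination_by tr.toNat
decreasing_by omega

def pvLoop4 (tr tf : Int) (acc : Nat) : Nat :=
  if 0 < tr ∧ 0 < tf then pvLoop4 (tr - 1) (tf - 1) (acc ||| (1 <<< (tr * 8 + tf).toNat)) else acc
termination_by tr.toNat
decreasing_by omega

def mask_bishop_occupancy (square : Int) : Int :=
  let r := PySem.Int.floordiv square 8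
  let f := PySem.Int.mod square 8
  let m1 := pvLoop1 (r + 1) (f + 1) 0
  let m2 := pvLoop2 (r + 1) (f - 1) m1
  let m3 := pvLoop3 (r - 1) (f + 1) m2
  let m4 := pvLoop4 (r - 1) (f - 1) m3
  ((m4 &&& 0xFFFFFFFFFFFFFFFF : Nat) : Int)

-- ===== PORT B =====
-- _ray(n, step, low) from Source B: bits at low, low+step, …, low+step*(n-1) as one
-- geometric-series number.  Shift amounts are ≥ 0 inside Pre_, so `.toNat` is exact there.
def pvRayB (n step low : Int) : Nat :=
  if 0 < n then (((1 <<< (step * n).toNat) - 1) / ((1 <<< step.toNat) - 1)) <<< low.toNat else 0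

def mask_bishop_occupancy_alt (square : Int) : Int :=
  let r := PySem.Int.floordiv square 8
  let f := PySem.Int.mod square 8
  let n1 := min (6 - r) (6 - f)
  let n2 := min (6 - r) (f - 1)
  let n3 := min (r - 1) (6 - f)
  let n4 := min (r - 1) (f - 1)
  let m := pvRayB n1 9 ((r + 1) * 8 + f + 1)
  let m := m ||| pvRayB n2 7 ((r + 1) * 8 + f - 1)
  let m := m ||| pvRayB n3 7 ((r - 1) * 8 + f + 1 - 7 * (n3 - 1))
  let m := m ||| pvRayB n4 9 ((r - 1) * 8 + f - 1 - 9 * (n4 - 1))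
  ((m &&& 0xFFFFFFFFFFFFFFFF : Nat) : Int)

-- ===== PRECONDITION & SPEC =====
-- Pre_ excludes exactly the inputs square ≤ -9, on which A raises ValueError
-- (a ray walk reaches a negative shift amount 1 << k, k < 0); B raises there too.
def Pre_mask_bishop_occupancy (square : Int) : Prop := -8 ≤ square
instance (square : Int) : Decidable (Pre_mask_bishop_occupancy square) := by
  unfold Pre_mask_bishop_occupancy; infer_instance

def pvWitness_mask_bishop_occupancy : Int := 27

def Spec_mask_bishop_occupancy (square : Int) (out : Int) : Prop := out = mask_bishop_occupancy_alt square
instance (square : Int) (out : Int) : Decidable (Spec_mask_bishop_occupancy square out) := by unfold Spec_mask_bishop_occupancy; infer_instance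

-- ===== CLAIM (what is proved, stated in full; the proofs are below) =====
def Claim_equal_mask_bishop_occupancy : Prop := ∀ (square : Int), Dom_mask_bishop_occupancy square → Pre_mask_bishop_occupancy square → Spec_mask_bishop_occupancy square (mask_bishop_occupancy square)

-- ===== LEMMAS AND PROOFS =====

-- geometric accumulators: pvG s n = 1 + 2^s + 2^(2s) + … + 2^((n-1)s) for s = 9 / 7
def pvG9 : ℕ → ℕ
  | 0 => 0
  | n + 1 => 1 + 512 * pvG9 n

def pvG7 : ℕ → ℕ
  | 0 => 0
  | n + 1 => 1 + 128 * pvG7 n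

theorem pvG9_mul (n : ℕ) : 511 * pvG9 n + 1 = 2 ^ (9 * n) := by
  induction n with
  | zero => simp [pvG9]
  | succ n ih =>
    have : (9 : ℕ) * (n + 1) = 9 * n + 9 := by ring
    rw [pvG9, this, pow_add]
    nlinarith [ih]

theorem pvG7_mul (n : ℕ) : 127 * pvG7 n + 1 = 2 ^ (7 * n) := by
  induction n with
  | zero => simp [pvG7]
  | succ n ih =>
    have : (7 : ℕ) * (n + 1) = 7 * n + 7 := by ring
    rw [pvG7, this, pow_add]
    nlinarith [ih]

theorem pvG9_div (n : ℕ) : (2 ^ (9 * n) - 1) / 511 = pvG9 n := by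
  rw [← pvG9_mul n]
  omega

theorem pvG7_div (n : ℕ) : (2 ^ (7 * n) - 1) / 127 = pvG7 n := by
  rw [← pvG7_mul n]
  omega

theorem pvG9_lt (n : ℕ) : pvG9 n < 2 ^ (9 * n) := by
  have := pvG9_mul n; omega

theorem pvG7_lt (n : ℕ) : pvG7 n < 2 ^ (7 * n) := by
  have := pvG7_mul n; omega

theorem pvG9_top (n : ℕ) : pvG9 (n + 1) = pvG9 n + 2 ^ (9 * n) := by
  have h1 := pvG9_mul (n + 1)
  have h2 := pvG9_mul n
  have h3 : (2 : ℕ) ^ (9 * (n + 1)) = 512 * 2 ^ (9 * n) := by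
    rw [show 9 * (n + 1) = 9 * n + 9 by ring, pow_add]; ring
  omega

theorem pvG7_top (n : ℕ) : pvG7 (n + 1) = pvG7 n + 2 ^ (7 * n) := by
  have h1 := pvG7_mul (n + 1)
  have h2 := pvG7_mul n
  have h3 : (2 : ℕ) ^ (7 * (n + 1)) = 128 * 2 ^ (7 * n) := by
    rw [show 7 * (n + 1) = 7 * n + 7 by ring, pow_add]; ring
  omega

-- pvRayB in closed pvG form
theorem pvRayB9_eq (n low : Int) (hn : 0 < n) :
    pvRayB n 9 low = pvG9 n.toNat * 2 ^ low.toNat := by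
  have h9 : ((9 : Int) * n).toNat = 9 * n.toNat := by omega
  simp only [pvRayB, if_pos hn, Nat.shiftLeft_eq, h9, one_mul]
  norm_num
  rw [show (2 : ℕ) ^ Int.toNat 9 - 1 = 511 from rfl, pvG9_div]

theorem pvRayB7_eq (n low : Int) (hn : 0 < n) :
    pvRayB n 7 low = pvG7 n.toNat * 2 ^ low.toNat := by
  have h7 : ((7 : Int) * n).toNat = 7 * n.toNat := by omega
  simp only [pvRayB, if_pos hn, Nat.shiftLeft_eq, h7, one_mul]
  norm_num
  rw [show (2 : ℕ) ^ Int.toNat 7 - 1 = 127 from rfl, pvG7_div]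

theorem pvRayB_nonpos (n step low : Int) (hn : ¬ 0 < n) : pvRayB n step low = 0 := by
  simp [pvRayB, hn]

-- pulling the accumulator out of each loop
theorem pvLoop1_or (k : ℕ) : ∀ (tr tf : Int) (acc : Nat), (7 - tr).toNat = k →
    pvLoop1 tr tf acc = acc ||| pvLoop1 tr tf 0 := by
  induction k using Nat.strong_induction_on with
  | _ k ih =>
    intro tr tf acc hk
    conv_lhs => rw [pvLoop1]
    conv_rhs => rw [pvLoop1]
    split_ifs with h
    · rw [ih ((7 - (tr + 1)).toNat) (by omega) _ _ _ rfl,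
        ih ((7 - (tr + 1)).toNat) (by omega) (tr + 1) (tf + 1) (0 ||| (1 <<< (tr * 8 + tf).toNat)) rfl]
      rw [Nat.zero_or, Nat.lor_assoc]
    · simp

theorem pvLoop2_or (k : ℕ) : ∀ (tr tf : Int) (acc : Nat), (7 - tr).toNat = k →
    pvLoop2 tr tf acc = acc ||| pvLoop2 tr tf 0 := by
  induction k using Nat.strong_induction_on with
  | _ k ih =>
    intro tr tf acc hk
    conv_lhs => rw [pvLoop2]
    conv_rhs => rw [pvLoop2]
    split_ifs with h
    · rw [ih ((7 - (tr + 1)).toNat) (by omega) _ _ _ rfl,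
        ih ((7 - (tr + 1)).toNat) (by omega) (tr + 1) (tf - 1) (0 ||| (1 <<< (tr * 8 + tf).toNat)) rfl]
      rw [Nat.zero_or, Nat.lor_assoc]
    · simp

theorem pvLoop3_or (k : ℕ) : ∀ (tr tf : Int) (acc : Nat), tr.toNat = k →
    pvLoop3 tr tf acc = acc ||| pvLoop3 tr tf 0 := by
  induction k using Nat.strong_induction_on with
  | _ k ih =>
    intro tr tf acc hk
    conv_lhs => rw [pvLoop3]
    conv_rhs => rw [pvLoop3]
    split_ifs with h
    · rw [ih (tr - 1).toNat (by omega) _ _ _ rfl,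
        ih (tr - 1).toNat (by omega) (tr - 1) (tf + 1) (0 ||| (1 <<< (tr * 8 + tf).toNat)) rfl]
      rw [Nat.zero_or, Nat.lor_assoc]
    · simp

theorem pvLoop4_or (k : ℕ) : ∀ (tr tf : Int) (acc : Nat), tr.toNat = k →
    pvLoop4 tr tf acc = acc ||| pvLoop4 tr tf 0 := by
  induction k using Nat.strong_induction_on with
  | _ k ih =>
    intro tr tf acc hk
    conv_lhs => rw [pvLoop4]
    conv_rhs => rw [pvLoop4]
    split_ifs with h
    · rw [ih (tr - 1).toNat (by omega) _ _ _ rfl,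
        ih (tr - 1).toNat (by omega) (tr - 1) (tf - 1) (0 ||| (1 <<< (tr * 8 + tf).toNat)) rfl]
      rw [Nat.zero_or, Nat.lor_assoc]
    · simp

-- ascending-ray step: 2^P ||| rest, rest a multiple of 2^(P+s)
theorem pv_or_low (P s : ℕ) (g : ℕ) (hs : 0 < s) :
    (2 ^ P : ℕ) ||| g * 2 ^ (P + s) = 2 ^ P + g * 2 ^ (P + s) := by
  have hb : (2 ^ P : ℕ) < 2 ^ (P + 1) := by
    have := Nat.pow_lt_pow_right (a := 2) (by omega) (Nat.lt_succ_self P)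
    simpa using this
  have h1 : g * 2 ^ (P + s) = 2 ^ (P + 1) * (g * 2 ^ (s - 1)) := by
    rw [show P + s = (P + 1) + (s - 1) by omega, pow_add]; ring
  calc (2 ^ P : ℕ) ||| g * 2 ^ (P + s)
      = 2 ^ (P + 1) * (g * 2 ^ (s - 1)) ||| 2 ^ P := by rw [h1, Nat.lor_comm]
    _ = 2 ^ (P + 1) * (g * 2 ^ (s - 1)) + 2 ^ P := (Nat.two_pow_add_eq_or_of_lt hb _).symm
    _ = 2 ^ P + g * 2 ^ (P + s) := by rw [h1]; ring

-- descending-ray step: 2^P ||| rest, rest < 2^P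
theorem pv_or_high (P : ℕ) (b : ℕ) (hb : b < 2 ^ P) :
    (2 ^ P : ℕ) ||| b = 2 ^ P + b := by
  have := (Nat.two_pow_add_eq_or_of_lt hb 1).symm
  simpa using this

-- ray lemma for loop 1 (tr,tf ascending, step +9)
theorem pvLoop1_eq (k : ℕ) : ∀ (tr tf : Int), (7 - tr).toNat = k → 0 ≤ tr → 0 ≤ tf →
    pvLoop1 tr tf 0 = pvRayB (min (7 - tr) (7 - tf)) 9 (tr * 8 + tf) := by
  induction k using Nat.strong_induction_on with
  | _ k ih =>
    intro tr tf hk htr htf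
    rw [pvLoop1]
    split_ifs with h
    · rw [pvLoop1_or ((7 - (tr + 1)).toNat) (tr + 1) (tf + 1) _ rfl, Nat.zero_or,
        ih ((7 - (tr + 1)).toNat) (by omega) (tr + 1) (tf + 1) rfl (by omega) (by omega)]
      set n : Int := min (7 - tr) (7 - tf) with hn
      have hn1 : 1 ≤ n := by omega
      have hrec : min (7 - (tr + 1)) (7 - (tf + 1)) = n - 1 := by omega
      rw [hrec, pvRayB9_eq n _ (by omega), Nat.shiftLeft_eq, one_mul]
      by_cases h1 : n = 1
      · rw [h1]
        norm_num [pvRayB, pvG9]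
      · have hn2 : 2 ≤ n := by omega
        rw [pvRayB9_eq (n - 1) _ (by omega)]
        have hP : ((tr + 1) * 8 + (tf + 1)).toNat = (tr * 8 + tf).toNat + 9 := by omega
        have hN : n.toNat = (n - 1).toNat + 1 := by omega
        rw [hP, hN, pvG9, pv_or_low _ 9 _ (by omega)]
        ring
    · rw [pvRayB_nonpos _ _ _ (by omega)]

-- ray lemma for loop 2 (tr ascending, tf descending, step +7)
theorem pvLoop2_eq (k : ℕ) : ∀ (tr tf : Int), (7 - tr).toNat = k → 0 ≤ tr →
    pvLoop2 tr tf 0 = pvRayB (min (7 - tr) tf) 7 (tr * 8 + tf) := by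
  induction k using Nat.strong_induction_on with
  | _ k ih =>
    intro tr tf hk htr
    rw [pvLoop2]
    split_ifs with h
    · rw [pvLoop2_or ((7 - (tr + 1)).toNat) (tr + 1) (tf - 1) _ rfl, Nat.zero_or,
        ih ((7 - (tr + 1)).toNat) (by omega) (tr + 1) (tf - 1) rfl (by omega)]
      set n : Int := min (7 - tr) tf with hn
      have hn1 : 1 ≤ n := by omega
      have hrec : min (7 - (tr + 1)) (tf - 1) = n - 1 := by omega
      rw [hrec, pvRayB7_eq n _ (by omega), Nat.shiftLeft_eq, one_mul]
      by_cases h1 : n = 1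
      · rw [h1]
        norm_num [pvRayB, pvG7]
      · have hn2 : 2 ≤ n := by omega
        rw [pvRayB7_eq (n - 1) _ (by omega)]
        have hP : ((tr + 1) * 8 + (tf - 1)).toNat = (tr * 8 + tf).toNat + 7 := by omega
        have hN : n.toNat = (n - 1).toNat + 1 := by omega
        rw [hP, hN, pvG7, pv_or_low _ 7 _ (by omega)]
        ring
    · rw [pvRayB_nonpos _ _ _ (by omega)]

-- ray lemma for loop 3 (tr descending, tf ascending, step -7; lowest bit fixed)
theorem pvLoop3_eq (k : ℕ) : ∀ (tr tf : Int), tr.toNat = k → 0 ≤ tf →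
    pvLoop3 tr tf 0 = pvRayB (min tr (7 - tf)) 7 (tr * 8 + tf - 7 * (min tr (7 - tf) - 1)) := by
  induction k using Nat.strong_induction_on with
  | _ k ih =>
    intro tr tf hk htf
    rw [pvLoop3]
    split_ifs with h
    · rw [pvLoop3_or (tr - 1).toNat (tr - 1) (tf + 1) _ rfl, Nat.zero_or,
        ih (tr - 1).toNat (by omega) (tr - 1) (tf + 1) rfl (by omega)]
      set n : Int := min tr (7 - tf) with hn
      have hn1 : 1 ≤ n := by omega
      have hrec : min (tr - 1) (7 - (tf + 1)) = n - 1 := by omega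
      rw [hrec, pvRayB7_eq n _ (by omega), Nat.shiftLeft_eq, one_mul]
      by_cases h1 : n = 1
      · rw [h1]
        norm_num [pvRayB, pvG7]
      · have hn2 : 2 ≤ n := by omega
        rw [pvRayB7_eq (n - 1) _ (by omega)]
        have hlow : ((tr - 1) * 8 + (tf + 1) - 7 * (n - 1 - 1)).toNat
            = (tr * 8 + tf - 7 * (n - 1)).toNat := by omega
        have hsplit : (tr * 8 + tf).toNat = 7 * (n - 1).toNat + (tr * 8 + tf - 7 * (n - 1)).toNat := by
          omega
        have hb : pvG7 (n - 1).toNat * 2 ^ (tr * 8 + tf - 7 * (n - 1)).toNat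
            < 2 ^ (7 * (n - 1).toNat + (tr * 8 + tf - 7 * (n - 1)).toNat) := by
          rw [pow_add]
          have h1 := pvG7_lt (n - 1).toNat
          have h2 := Nat.two_pow_pos ((tr * 8 + tf - 7 * (n - 1)).toNat)
          nlinarith
        rw [hlow, show n.toNat = (n - 1).toNat + 1 by omega, pvG7_top, add_mul, hsplit,
          pv_or_high _ _ hb, pow_add]
        ring
    · rw [pvRayB_nonpos _ _ _ (by omega)]

-- ray lemma for loop 4 (tr,tf descending, step -9; lowest bit fixed)
theorem pvLoop4_eq (k : ℕ) : ∀ (tr tf : Int), tr.toNat = k →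
    pvLoop4 tr tf 0 = pvRayB (min tr tf) 9 (tr * 8 + tf - 9 * (min tr tf - 1)) := by
  induction k using Nat.strong_induction_on with
  | _ k ih =>
    intro tr tf hk
    rw [pvLoop4]
    split_ifs with h
    · rw [pvLoop4_or (tr - 1).toNat (tr - 1) (tf - 1) _ rfl, Nat.zero_or,
        ih (tr - 1).toNat (by omega) (tr - 1) (tf - 1) rfl]
      set n : Int := min tr tf with hn
      have hn1 : 1 ≤ n := by omega
      have hrec : min (tr - 1) (tf - 1) = n - 1 := by omega
      rw [hrec, pvRayB9_eq n _ (by omega), Nat.shiftLeft_eq, one_mul]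
      by_cases h1 : n = 1
      · rw [h1]
        norm_num [pvRayB, pvG9]
      · have hn2 : 2 ≤ n := by omega
        rw [pvRayB9_eq (n - 1) _ (by omega)]
        have hlow : ((tr - 1) * 8 + (tf - 1) - 9 * (n - 1 - 1)).toNat
            = (tr * 8 + tf - 9 * (n - 1)).toNat := by omega
        have hsplit : (tr * 8 + tf).toNat = 9 * (n - 1).toNat + (tr * 8 + tf - 9 * (n - 1)).toNat := by
          omega
        have hb : pvG9 (n - 1).toNat * 2 ^ (tr * 8 + tf - 9 * (n - 1)).toNat
            < 2 ^ (9 * (n - 1).toNat + (tr * 8 + tf - 9 * (n - 1)).toNat) := by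
          rw [pow_add]
          have h1 := pvG9_lt (n - 1).toNat
          have h2 := Nat.two_pow_pos ((tr * 8 + tf - 9 * (n - 1)).toNat)
          nlinarith
        rw [hlow, show n.toNat = (n - 1).toNat + 1 by omega, pvG9_top, add_mul, hsplit,
          pv_or_high _ _ hb, pow_add]
        ring
    · rw [pvRayB_nonpos _ _ _ (by omega)]

-- ===== VERDICT (by name: the statement is the Claim_ definition above) =====
theorem mask_bishop_occupancy_spec : Claim_equal_mask_bishop_occupancy := by
  intro square hdom hpre
  have hsq : -8 ≤ square := hpre
  unfold Spec_mask_bishop_occupancy mask_bishop_occupancy mask_bishop_occupancy_alt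
  dsimp only
  have h8 : (0 : Int) < 8 := by norm_num
  rw [PySem.Int.floordiv_eq_ediv_of_pos h8, PySem.Int.mod_eq_emod_of_pos h8]
  set r : Int := square / 8 with hr
  set f : Int := square % 8 with hf
  have hrb : -1 ≤ r := by omega
  have hfb : 0 ≤ f ∧ f < 8 := ⟨Int.emod_nonneg _ (by norm_num), Int.emod_lt_of_pos _ (by norm_num)⟩
  -- A's accumulators pulled apart with the _or lemmas, each ray rewritten in closed form
  rw [pvLoop2_or ((7 - (r + 1)).toNat) _ _ _ rfl,
    pvLoop3_or ((r - 1).toNat) _ _ _ rfl,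
    pvLoop4_or ((r - 1).toNat) _ _ _ rfl,
    pvLoop1_eq ((7 - (r + 1)).toNat) (r + 1) (f + 1) rfl (by omega) (by omega),
    pvLoop2_eq ((7 - (r + 1)).toNat) (r + 1) (f - 1) rfl (by omega),
    pvLoop3_eq ((r - 1).toNat) (r - 1) (f + 1) rfl (by omega),
    pvLoop4_eq ((r - 1).toNat) (r - 1) (f - 1) rfl]
  have e1n : min (7 - (r + 1)) (7 - (f + 1)) = min (6 - r) (6 - f) := by omega
  have e1p : (r + 1) * 8 + (f + 1) = (r + 1) * 8 + f + 1 := by ring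
  have e2n : min (7 - (r + 1)) (f - 1) = min (6 - r) (f - 1) := by omega
  have e2p : (r + 1) * 8 + (f - 1) = (r + 1) * 8 + f - 1 := by ring
  have e3n : min (r - 1) (7 - (f + 1)) = min (r - 1) (6 - f) := by omega
  have e3p : (r - 1) * 8 + (f + 1) = (r - 1) * 8 + f + 1 := by ring
  have e4p : (r - 1) * 8 + (f - 1) = (r - 1) * 8 + f - 1 := by ring
  rw [e1n, e1p, e2n, e2p, e3n, e3p, e4p]
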